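-- pv_equiv track=rewrite | github.com/AmigoCap/GPSFlow | speedClassification.py | concacatenateLists
-- ===== SOURCE A (Python) =====
-- def setToZero(i):
--     if i<=0:
--         return 0
--     else:
--         return i
--
-- def concacatenateLists(speedTrend,lS):
--     lSf=[lS[0]]
--     a=[speedTrend[0]]
--     for ii in range(0,len(speedTrend)-1):
--         if speedTrend[ii]==speedTrend[ii+1]:
--             lSf[-1]=lSf[-1]+list(filter(lambda x : x>=0 ,lS[ii+1]))
--         else:
--             lSf.append(list(map(setToZero,lS[ii+1])))
--             a.append(speedTrend[ii+1])
--     return lSf,a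
-- ===== SOURCE B (Python) =====
-- def setToZero(i):
--     return 0 if i <= 0 else i
--
-- def concacatenateLists(speedTrend, lS):
--     n = len(speedTrend)
--     # pass 1: indices where a new run of equal trend values begins
--     starts = [i for i in range(n) if i == 0 or speedTrend[i] != speedTrend[i - 1]]
--     ends = starts[1:] + [n]
--     startset = set(starts)
--     # pass 2: transform every sublist independently according to its role
--     transformed = [
--         lS[0] if i == 0
--         else [setToZero(x) for x in lS[i]] if i in startset
--         else [x for x in lS[i] if x >= 0]
--         for i in range(n)
--     ]
--     # pass 3: assemble each run by concatenating its slice of transformed sublists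
--     lSf = [sum(transformed[s:e], []) for s, e in zip(starts, ends)]
--     a = [speedTrend[s] for s in starts]
--     return lSf, a
-- ===== Notes on version B (the rewrite author's own statement) =====
-- stated objective: alternative
-- what changed: Replaces A's single stateful pass (adjacent comparisons patching lSf[-1] in place) by three independent passes: first compute the run-boundary indices, then transform every sublist by its role (raw / clamped-to-zero / filtered), then assemble each run as a concatenated slice of the transformed list.
import Mathlib
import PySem

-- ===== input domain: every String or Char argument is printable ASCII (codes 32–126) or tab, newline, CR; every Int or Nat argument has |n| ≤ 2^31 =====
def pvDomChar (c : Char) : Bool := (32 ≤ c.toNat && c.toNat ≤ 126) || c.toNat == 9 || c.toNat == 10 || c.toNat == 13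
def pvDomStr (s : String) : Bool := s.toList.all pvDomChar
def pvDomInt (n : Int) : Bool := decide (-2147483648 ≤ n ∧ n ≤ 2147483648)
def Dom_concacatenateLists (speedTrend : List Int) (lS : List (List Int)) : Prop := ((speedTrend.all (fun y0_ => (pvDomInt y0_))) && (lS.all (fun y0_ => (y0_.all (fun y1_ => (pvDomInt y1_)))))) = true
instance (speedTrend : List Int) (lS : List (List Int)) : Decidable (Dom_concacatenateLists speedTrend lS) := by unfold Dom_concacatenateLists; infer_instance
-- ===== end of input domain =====

-- ===== PORT A =====
-- B replaces A's single stateful pass (adjacent comparison patching lSf[-1]) by three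
-- staged passes: run-boundary indices, per-role transforms, slice assembly ('alternative').
def setToZero (i : Int) : Int := if i ≤ 0 then 0 else i

-- literal port of A's loop: state (lSf, a); 'lSf[-1] = lSf[-1] + …' is dropLast ++ [lSf[-1] ++ …]
def concacatenateLists (speedTrend : List Int) (lS : List (List Int)) : List (List Int) × List Int :=
  let init : List (List Int) × List Int :=
    ([PySem.List.pyGetD lS 0 []], [PySem.List.pyGetD speedTrend 0 0])
  (PySem.List.pyRange 0 ((speedTrend.length : Int) - 1) 1).foldl
    (fun st ii =>
      if PySem.List.pyGetD speedTrend ii 0 = PySem.List.pyGetD speedTrend (ii + 1) 0 then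
        (st.1.dropLast ++
          [PySem.List.pyGetD st.1 (-1) [] ++
            (PySem.List.pyGetD lS (ii + 1) []).filter (fun x => decide (0 ≤ x))], st.2)
      else
        (st.1 ++ [(PySem.List.pyGetD lS (ii + 1) []).map setToZero],
         st.2 ++ [PySem.List.pyGetD speedTrend (ii + 1) 0]))
    init

-- ===== PORT B =====
-- pass 1: starts = [i for i in range(n) if i == 0 or speedTrend[i] != speedTrend[i-1]]
def startsB (speedTrend : List Int) : List Int :=
  (PySem.List.pyRange 0 (speedTrend.length : Int) 1).filter
    (fun i => decide (i = 0) ||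
      decide (PySem.List.pyGetD speedTrend i 0 ≠ PySem.List.pyGetD speedTrend (i - 1) 0))

-- pass 2: per-role transform of each sublist (raw / setToZero-mapped / filtered)
def transformB (n : Int) (lS : List (List Int)) (startset : PySem.Set Int) : List (List Int) :=
  (PySem.List.pyRange 0 n 1).map
    (fun i =>
      if i = 0 then PySem.List.pyGetD lS 0 []
      else if i ∈ startset then (PySem.List.pyGetD lS i []).map setToZero
      else (PySem.List.pyGetD lS i []).filter (fun x => decide (0 ≤ x)))

-- pass 3: lSf = [sum(transformed[s:e], []) for s, e in zip(starts, ends)]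
def concacatenateLists_alt (speedTrend : List Int) (lS : List (List Int)) : List (List Int) × List Int :=
  (((startsB speedTrend).zip ((startsB speedTrend).drop 1 ++ [(speedTrend.length : Int)])).map
      (fun se =>
        (PySem.List.slice
            (transformB (speedTrend.length : Int) lS (PySem.Set.ofList (startsB speedTrend)))
            (some se.1) (some se.2)).foldl (· ++ ·) []),
   (startsB speedTrend).map (fun s => PySem.List.pyGetD speedTrend s 0))

-- ===== PRECONDITION & SPEC =====
-- A raises IndexError on empty speedTrend (it reads speedTrend[0]) and whenever lS is
-- shorter than speedTrend (it reads lS[ii+1] up to index len(speedTrend)-1); exactly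
-- those raising inputs are excluded.
def Pre_concacatenateLists (speedTrend : List Int) (lS : List (List Int)) : Prop :=
  speedTrend ≠ [] ∧ speedTrend.length ≤ lS.length
instance (speedTrend : List Int) (lS : List (List Int)) : Decidable (Pre_concacatenateLists speedTrend lS) := by unfold Pre_concacatenateLists; infer_instance
def pvWitness_concacatenateLists : List Int × List (List Int) := ([1, 1, 2], [[3, -1], [0, 5], [-2]])

def Spec_concacatenateLists (speedTrend : List Int) (lS : List (List Int)) (out : List (List Int) × List Int) : Prop := out = concacatenateLists_alt speedTrend lS
instance (speedTrend : List Int) (lS : List (List Int)) (out : List (List Int) × List Int) : Decidable (Spec_concacatenateLists speedTrend lS out) := by unfold Spec_concacatenateLists; infer_instance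

-- ===== CLAIM (what is proved, stated in full; the proofs are below) =====
def Claim_equal_concacatenateLists : Prop := ∀ (speedTrend : List Int) (lS : List (List Int)), Dom_concacatenateLists speedTrend lS → Pre_concacatenateLists speedTrend lS → Spec_concacatenateLists speedTrend lS (concacatenateLists speedTrend lS)

-- ===== LEMMAS AND PROOFS =====

-- prefix indexing: an index strictly inside xs reads the same through xs ++ ys
theorem pyGetD_append_prefix (xs ys : List Int) (j : Int) (d : Int)
    (h0 : 0 ≤ j) (h1 : j < (xs.length : Int)) :
    PySem.List.pyGetD (xs ++ ys) j d = PySem.List.pyGetD xs j d := by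
  have hj : j.toNat < xs.length := by omega
  rw [PySem.List.pyGetD_eq_getElem _ _ h0 (by simp only [List.length_append]; push_cast; omega),
    PySem.List.pyGetD_eq_getElem _ _ h0 h1]
  exact List.getElem_append_left hj

-- slice confined to the prefix ignores an appended tail
theorem slice_append_left (xs ys : List (List Int)) (a b : Int)
    (ha : 0 ≤ a) (hal : a ≤ (xs.length : Int)) (hb : 0 ≤ b) (hbl : b ≤ (xs.length : Int)) :
    PySem.List.slice (xs ++ ys) (some a) (some b) = PySem.List.slice xs (some a) (some b) := by
  rw [PySem.List.slice_toNat _ ha hb, PySem.List.slice_toNat _ ha hb,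
    List.drop_append_of_le_length (by omega),
    List.take_append_of_le_length (by simp only [List.length_drop]; omega)]

-- slice of the snoc up to the new end picks up exactly the appended element
theorem slice_snoc_full (xs : List (List Int)) (u : List Int) (a : Int)
    (ha : 0 ≤ a) (hal : a ≤ (xs.length : Int)) :
    PySem.List.slice (xs ++ [u]) (some a) (some ((xs.length : Int) + 1)) =
      PySem.List.slice xs (some a) (some (xs.length : Int)) ++ [u] := by
  have h1 : ((xs.length : Int) + 1).toNat = xs.length + 1 := by omega
  have h2 : ((xs.length : Int)).toNat = xs.length := by omega
  rw [PySem.List.slice_toNat _ ha (by positivity), PySem.List.slice_toNat _ ha (by omega),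
    h1, h2, List.drop_append_of_le_length (by omega),
    List.take_of_length_le (by simp only [List.length_append, List.length_drop,
      List.length_cons, List.length_nil]; omega),
    List.take_of_length_le (by simp only [List.length_drop]; omega)]

theorem mem_startsB (st : List Int) (i : Int) (h : i ∈ startsB st) :
    0 ≤ i ∧ i < (st.length : Int) := by
  unfold startsB at h
  simp only [List.mem_filter] at h
  exact (PySem.List.mem_pyRange_one).1 h.1

theorem startsB_cons (st : List Int) (h : st ≠ []) :
    startsB st = 0 :: (PySem.List.pyRange 1 (st.length : Int) 1).filter
      (fun i => decide (i = 0) ||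
        decide (PySem.List.pyGetD st i 0 ≠ PySem.List.pyGetD st (i - 1) 0)) := by
  have hn : 0 < (st.length : Int) := by
    cases st with
    | nil => exact absurd rfl h
    | cons a l => simp
  unfold startsB
  rw [PySem.List.pyRange_one_cons hn]
  simp

theorem startsB_snoc (st : List Int) (t : Int) (h : st ≠ []) :
    startsB (st ++ [t]) =
      startsB st ++ (if st.getLast? = some t then [] else [(st.length : Int)]) := by
  have hn : 1 ≤ st.length := List.length_pos_of_ne_nil h
  have hN0 : ((st.length : Int)) ≠ 0 := by omega
  unfold startsB
  have hlen : (((st ++ [t]).length : Nat) : Int) = (st.length : Int) + 1 := by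
    simp
  rw [hlen, PySem.List.pyRange_one_succ_right (by positivity), List.filter_append]
  congr 1
  · apply List.filter_congr
    intro i hi
    rw [PySem.List.mem_pyRange_one] at hi
    by_cases hi0 : i = 0
    · simp [hi0]
    · rw [pyGetD_append_prefix st [t] i 0 hi.1 hi.2,
        pyGetD_append_prefix st [t] (i - 1) 0 (by omega) (by omega)]
  · have hgt : PySem.List.pyGetD (st ++ [t]) ((st.length : Int)) 0 = t := by
      rw [PySem.List.pyGetD_natCast]; simp
    have htn : (((st.length : Int)) - 1).toNat = st.length - 1 := by omega
    have hgl : PySem.List.pyGetD (st ++ [t]) ((st.length : Int) - 1) 0 = st.getLast h := by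
      rw [pyGetD_append_prefix st [t] _ 0 (by omega) (by omega),
        PySem.List.pyGetD_eq_getElem _ _ (by omega) (by omega)]
      simp only [htn]
      exact (List.getLast_eq_getElem h).symm
    have hcond : (st.getLast? = some t) ↔ (st.getLast h = t) := by
      rw [List.getLast?_eq_some_getLast h]; simp
    simp only [List.filter_cons, List.filter_nil, hgt, hgl]
    by_cases hc : st.getLast h = t
    · rw [if_pos (hcond.2 hc)]
      simp only [hc]
      simp
      exact h
    · rw [if_neg (fun e => hc (hcond.1 e))]
      simp
      exact fun _ e => hc e.symm

theorem transformB_snoc (st : List Int) (lS : List (List Int)) (t : Int) (h : st ≠ []) :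
    transformB ((st.length : Int) + 1) lS (PySem.Set.ofList (startsB (st ++ [t]))) =
      transformB (st.length : Int) lS (PySem.Set.ofList (startsB st)) ++
        [if st.getLast? = some t then
            (PySem.List.pyGetD lS (st.length : Int) []).filter (fun x => decide (0 ≤ x))
          else (PySem.List.pyGetD lS (st.length : Int) []).map setToZero] := by
  have hn : 1 ≤ st.length := List.length_pos_of_ne_nil h
  have hN0 : ((st.length : Int)) ≠ 0 := by omega
  unfold transformB
  rw [PySem.List.pyRange_one_succ_right (by positivity), List.map_append]
  congr 1
  · apply List.map_congr_left
    intro i hi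
    rw [PySem.List.mem_pyRange_one] at hi
    by_cases hi0 : i = 0
    · simp [hi0]
    · have hiN : i ≠ ((st.length : Int)) := by omega
      have hmem : (i ∈ startsB (st ++ [t])) ↔ (i ∈ startsB st) := by
        rw [startsB_snoc st t h]
        by_cases hc : st.getLast? = some t
        · simp [hc]
        · simp [hc, hiN]
      by_cases hm : i ∈ startsB st
      · simp [hi0, hm, hmem.2 hm]
      · simp [hi0, hm, hmem]
  · simp only [List.map_cons, List.map_nil]
    have hmemN : (((st.length : Int)) ∈ startsB (st ++ [t])) ↔
        ¬ (st.getLast? = some t) := by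
      rw [startsB_snoc st t h]
      by_cases hc : st.getLast? = some t
      · simp [hc]
        intro hmem
        exact absurd (mem_startsB st _ hmem).2 (by omega)
      · simp [hc]
    by_cases hc : st.getLast? = some t
    · rw [if_pos hc, if_neg hN0, if_neg (by simp [hmemN, hc])]
    · rw [if_neg hc, if_neg hN0, if_pos (by simp [hmemN, hc])]

theorem length_transformB (n : Int) (lS : List (List Int)) (s : PySem.Set Int) :
    ((transformB n lS s).length : Int) = max n 0 := by
  unfold transformB
  rw [List.length_map, PySem.List.length_pyRange_one]
  omega

-- the zip of starts with ends, written as a chain of consecutive pairs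
def chain (s : Int) (l : List Int) (e : Int) : List (Int × Int) :=
  match l with
  | [] => [(s, e)]
  | s' :: l' => (s, s') :: chain s' l' e

theorem zip_chain (s : Int) (l : List Int) (e : Int) :
    (s :: l).zip (l ++ [e]) = chain s l e := by
  induction l generalizing s with
  | nil => rfl
  | cons s' l' ih => simp [chain, ih]

theorem chain_snoc (s : Int) (l : List Int) (m e : Int) :
    chain s (l ++ [m]) e = chain s l m ++ [(m, e)] := by
  induction l generalizing s with
  | nil => rfl
  | cons s' l' ih => simp [chain, ih]

theorem chain_split (s : Int) (l : List Int) (e : Int) :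
    chain s l e = (s :: l).zip l ++ [((s :: l).getLast (by simp), e)] := by
  induction l generalizing s with
  | nil => rfl
  | cons s' l' ih => simp [chain, ih, List.getLast_cons]

theorem mem_chain (s : Int) (l : List Int) (e : Int) (p : Int × Int) (h : p ∈ chain s l e) :
    (p.1 = s ∨ p.1 ∈ l) ∧ (p.2 ∈ l ∨ p.2 = e) := by
  induction l generalizing s with
  | nil => simp [chain] at h; simp [h]
  | cons s' l' ih =>
      simp only [chain, List.mem_cons] at h
      rcases h with h | h
      · simp [h]
      · rcases ih s' h with ⟨h1, h2⟩
        refine ⟨?_, ?_⟩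
        · rcases h1 with h1 | h1 <;> simp [h1]
        · rcases h2 with h2 | h2 <;> simp [h2]

-- B's step behaviour on appending one trend value (mirrors A's loop step)
theorem alt_concat_eq (st : List Int) (lS : List (List Int)) (t : Int)
    (h : st.getLast? = some t) :
    concacatenateLists_alt (st ++ [t]) lS =
      ((concacatenateLists_alt st lS).1.dropLast ++
        [PySem.List.pyGetD (concacatenateLists_alt st lS).1 (-1) [] ++
          (PySem.List.pyGetD lS (st.length : Int) []).filter (fun x => decide (0 ≤ x))],
       (concacatenateLists_alt st lS).2) := by
  have hne : st ≠ [] := by rintro rfl; simp at h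
  have hn : 1 ≤ st.length := List.length_pos_of_ne_nil hne
  obtain ⟨l, hS⟩ : ∃ l, startsB st = 0 :: l := ⟨_, startsB_cons st hne⟩
  have hbound : ∀ i ∈ (0 : Int) :: l, 0 ≤ i ∧ i < (st.length : Int) := by
    intro i hi; exact mem_startsB st i (hS ▸ hi)
  have hlen : (((st ++ [t]).length : Nat) : Int) = (st.length : Int) + 1 := by simp
  have hS' : startsB (st ++ [t]) = 0 :: l := by
    rw [startsB_snoc st t hne, if_pos h, hS, List.append_nil]
  have hT := transformB_snoc st lS t hne
  rw [hS', hS, if_pos h] at hT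
  unfold concacatenateLists_alt
  rw [hS', hS, hlen]
  set T := transformB ((st.length : Int)) lS (PySem.Set.ofList ((0 : Int) :: l)) with hTdef
  have hTlen : ((T.length : Nat) : Int) = (st.length : Int) := by
    rw [hTdef, length_transformB]; omega
  simp only [List.drop_succ_cons, List.drop_zero]
  rw [zip_chain, zip_chain, hT]
  simp only [Prod.mk.injEq]
  constructor
  · rw [chain_split 0 l ((st.length : Int) + 1), chain_split 0 l (st.length : Int),
      List.map_append, List.map_append]
    simp only [List.map_cons, List.map_nil]
    rw [List.dropLast_concat, PySem.List.pyGetD_neg_one_append_singleton]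
    congr 1
    · apply List.map_congr_left
      intro p hp
      obtain ⟨hp1, hp2⟩ := List.of_mem_zip hp
      have hb1 := hbound _ hp1
      have hb2 := hbound _ (List.mem_cons_of_mem _ hp2)
      rw [slice_append_left T _ p.1 p.2 hb1.1 (by omega) hb2.1 (by omega)]
    · have hsl := hbound _ (List.getLast_mem (l := (0 : Int) :: l) (by simp))
      have he : (st.length : Int) + 1 = ((T.length : Nat) : Int) + 1 := by rw [hTlen]
      rw [he, slice_snoc_full T _ _ hsl.1 (by omega), hTlen, List.foldl_append]
      simp
  · apply List.map_congr_left
    intro i hi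
    have hb := hbound _ hi
    exact pyGetD_append_prefix st [t] i 0 hb.1 hb.2

theorem alt_concat_ne (st : List Int) (lS : List (List Int)) (t : Int)
    (hne : st ≠ []) (h : st.getLast? ≠ some t) :
    concacatenateLists_alt (st ++ [t]) lS =
      ((concacatenateLists_alt st lS).1 ++ [(PySem.List.pyGetD lS (st.length : Int) []).map setToZero],
       (concacatenateLists_alt st lS).2 ++ [t]) := by
  have hn : 1 ≤ st.length := List.length_pos_of_ne_nil hne
  obtain ⟨l, hS⟩ : ∃ l, startsB st = 0 :: l := ⟨_, startsB_cons st hne⟩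
  have hbound : ∀ i ∈ (0 : Int) :: l, 0 ≤ i ∧ i < (st.length : Int) := by
    intro i hi; exact mem_startsB st i (hS ▸ hi)
  have hlen : (((st ++ [t]).length : Nat) : Int) = (st.length : Int) + 1 := by simp
  have hS' : startsB (st ++ [t]) = 0 :: (l ++ [(st.length : Int)]) := by
    rw [startsB_snoc st t hne, if_neg h, hS, List.cons_append]
  have hT := transformB_snoc st lS t hne
  rw [hS', hS, if_neg h] at hT
  unfold concacatenateLists_alt
  rw [hS', hS, hlen]
  set T := transformB ((st.length : Int)) lS (PySem.Set.ofList ((0 : Int) :: l)) with hTdef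
  have hTlen : ((T.length : Nat) : Int) = (st.length : Int) := by
    rw [hTdef, length_transformB]; omega
  simp only [List.drop_succ_cons, List.drop_zero]
  rw [zip_chain, zip_chain, hT, chain_snoc, List.map_append]
  simp only [List.map_cons, List.map_nil, Prod.mk.injEq]
  refine ⟨?_, ?_⟩
  · congr 1
    · apply List.map_congr_left
      intro p hp
      obtain ⟨hp1, hp2⟩ := mem_chain 0 l (st.length : Int) p hp
      have hb1 : 0 ≤ p.1 ∧ p.1 < (st.length : Int) := by
        rcases hp1 with h1 | h1
        · exact ⟨le_of_eq h1.symm, by rw [h1]; exact_mod_cast hn⟩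
        · exact hbound _ (List.mem_cons_of_mem _ h1)
      have hb2 : 0 ≤ p.2 ∧ p.2 ≤ (st.length : Int) := by
        rcases hp2 with h2 | h2
        · have := hbound _ (List.mem_cons_of_mem _ h2); omega
        · simp [h2]
      rw [slice_append_left T _ p.1 p.2 hb1.1 (by omega) hb2.1 (by omega)]
    · have he : (st.length : Int) + 1 = ((T.length : Nat) : Int) + 1 := by rw [hTlen]
      have hs : (st.length : Int) = ((T.length : Nat) : Int) := hTlen.symm
      rw [he]
      conv_lhs => rw [hs]
      rw [slice_snoc_full T _ _ (by omega) (by omega)]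
      have hnil : PySem.List.slice T (some ((T.length : Nat) : Int)) (some ((T.length : Nat) : Int)) = [] := by
        rw [PySem.List.slice_toNat _ (by positivity) (by positivity)]
        simp
      rw [hnil]
      simp
      rw [show T.length = st.length from by exact_mod_cast hTlen]
  · simp only [List.map_append, List.map_cons, List.map_nil, List.cons_append]
    congr 1
    · exact pyGetD_append_prefix st [t] 0 0 le_rfl (by exact_mod_cast hn)
    congr 1
    · apply List.map_congr_left
      intro i hi
      have hb := hbound _ (List.mem_cons_of_mem _ hi)
      exact pyGetD_append_prefix st [t] i 0 hb.1 hb.2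
    · rw [PySem.List.pyGetD_natCast]
      simp

theorem A_concat (st : List Int) (lS : List (List Int)) (t : Int) (hne : st ≠ []) :
    concacatenateLists (st ++ [t]) lS =
      (if st.getLast? = some t then
        ((concacatenateLists st lS).1.dropLast ++
          [PySem.List.pyGetD (concacatenateLists st lS).1 (-1) [] ++
            (PySem.List.pyGetD lS (st.length : Int) []).filter (fun x => decide (0 ≤ x))],
         (concacatenateLists st lS).2)
      else
        ((concacatenateLists st lS).1 ++ [(PySem.List.pyGetD lS (st.length : Int) []).map setToZero],
         (concacatenateLists st lS).2 ++ [t])) := by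
  obtain ⟨m, hm⟩ : ∃ m, st.length = m + 1 := by
    cases st with
    | nil => exact absurd rfl hne
    | cons a l => exact ⟨l.length, by simp⟩
  have hcast : ((st ++ [t]).length : Int) - 1 = (m : Int) + 1 := by
    simp [hm]
  have hcast2 : ((st.length : Int)) - 1 = (m : Int) := by simp [hm]
  unfold concacatenateLists
  rw [hcast, hcast2, PySem.List.pyRange_one_succ_right (by positivity), List.foldl_append]
  have hinit : PySem.List.pyGetD (st ++ [t]) 0 0 = PySem.List.pyGetD st 0 0 := by
    cases st with
    | nil => exact absurd rfl hne
    | cons a l => simp [PySem.List.pyGetD_zero]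
  have hbody :
      (PySem.List.pyRange 0 (m : Int) 1).foldl
        (fun s ii =>
          if PySem.List.pyGetD (st ++ [t]) ii 0 = PySem.List.pyGetD (st ++ [t]) (ii + 1) 0 then
            (s.1.dropLast ++
              [PySem.List.pyGetD s.1 (-1) [] ++
                (PySem.List.pyGetD lS (ii + 1) []).filter (fun x => decide (0 ≤ x))], s.2)
          else
            (s.1 ++ [(PySem.List.pyGetD lS (ii + 1) []).map setToZero],
             s.2 ++ [PySem.List.pyGetD (st ++ [t]) (ii + 1) 0]))
        ([PySem.List.pyGetD lS 0 []], [PySem.List.pyGetD (st ++ [t]) 0 0]) =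
      (PySem.List.pyRange 0 (m : Int) 1).foldl
        (fun s ii =>
          if PySem.List.pyGetD st ii 0 = PySem.List.pyGetD st (ii + 1) 0 then
            (s.1.dropLast ++
              [PySem.List.pyGetD s.1 (-1) [] ++
                (PySem.List.pyGetD lS (ii + 1) []).filter (fun x => decide (0 ≤ x))], s.2)
          else
            (s.1 ++ [(PySem.List.pyGetD lS (ii + 1) []).map setToZero],
             s.2 ++ [PySem.List.pyGetD st (ii + 1) 0]))
        ([PySem.List.pyGetD lS 0 []], [PySem.List.pyGetD st 0 0]) := by
    rw [hinit]
    apply PySem.List.foldl_congr_mem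
    intro acc ii hii
    rw [PySem.List.mem_pyRange_one] at hii
    have hget : ∀ jj : Int, 0 ≤ jj → jj ≤ (m : Int) →
        PySem.List.pyGetD (st ++ [t]) jj 0 = PySem.List.pyGetD st jj 0 := by
      intro jj h0 hj
      exact pyGetD_append_prefix st [t] jj 0 h0 (by rw [hm]; push_cast; omega)
    rw [hget ii hii.1 (by omega), hget (ii + 1) (by omega) (by omega)]
  rw [hbody]
  have hlastget : PySem.List.pyGetD (st ++ [t]) (m : Int) 0 = st.getLast hne := by
    rw [PySem.List.pyGetD_eq_getElem _ _ (by positivity) (by simp [hm])]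
    rw [List.getElem_append_left (by simp [hm])]
    simp [List.getLast_eq_getElem, hm]
  have htget : PySem.List.pyGetD (st ++ [t]) ((st.length : Nat) : Int) 0 = t := by
    rw [PySem.List.pyGetD_natCast]
    simp
  have hlS : ((m : Int) + 1) = ((st.length : Nat) : Int) := by simp [hm]
  simp only [List.foldl_cons, List.foldl_nil, hlastget, hlS, htget]
  have hcond : (st.getLast hne = t) ↔ (st.getLast? = some t) := by
    rw [List.getLast?_eq_some_getLast hne]; simp
  by_cases hc : st.getLast? = some t
  · rw [if_pos (hcond.2 hc), if_pos hc]
  · rw [if_neg (fun e => hc (hcond.1 e)), if_neg hc]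

theorem main_equiv (st : List Int) (lS : List (List Int)) (h : st ≠ []) :
    concacatenateLists st lS = concacatenateLists_alt st lS := by
  induction st using List.reverseRecOn with
  | nil => exact absurd rfl h
  | append_singleton xs t ih =>
      by_cases hx : xs = []
      · subst hx
        have h1 : ((([t] : List Int).length : Nat) : Int) = 1 := by simp
        have h2 : PySem.List.pyRange 0 1 1 = [0] := by decide
        simp only [List.nil_append]
        unfold concacatenateLists concacatenateLists_alt startsB transformB
        rw [h1, h2]
        norm_num [PySem.List.pyRange_one_eq_nil, PySem.List.slice_to,
          PySem.List.pyGetD_zero_cons, PySem.List.pyGetD_zero]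
      · rw [A_concat xs lS t hx]
        by_cases hc : xs.getLast? = some t
        · rw [if_pos hc, ih hx, ← alt_concat_eq xs lS t hc]
        · rw [if_neg hc, ih hx, ← alt_concat_ne xs lS t hx hc]

-- ===== VERDICT (by name: the statement is the Claim_ definition above) =====
theorem concacatenateLists_spec : Claim_equal_concacatenateLists := by
  intro st lS _ hpre
  unfold Spec_concacatenateLists
  exact main_equiv st lS hpre.1
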